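-- pv_equiv track=rewrite | github.com/necromancerrkull-cmyk/Shawzincode | Shawzin Capstone Project 0.1.3.py | unmask
-- ===== SOURCE A (Python) =====
-- Key = {
--     'B':'A', 'J':'B', 'R':'C', 'h':'D', 'Z':'E', 'x':'F', 'p':'G',
--     '5':'H', 'C':'I', 'K':'J', 'S':'K', 'i':'L', 'a':'M', 'y':'N',
--     'q':'O', '6':'P', 'E':'Q', 'M':'R', 'U':'S', 'k':'T', 'c':'U',
--     '0':'V', 's':'W', '8':'XYZ', 'GJ':'1', 'GZ':'2', 'G5':'3',
--     'EK5':'4', 'Ea5':'5', 'E7':'6', 'M7':'7', 'c7':'8', '/':'9',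
--     'H':'0', 'F':'!', 'EJ':'@', 'ER':'#', 'Eh':'$', 'EZ':'%',
--     'Ex':'^', 'Ep':'&', 'E5':'*', 'BM':'(', 'N':')', 'MR':'-',
--     'Mh':'_', 'MZ':'=', 'Mx':'+', 'Mp':'[', 'M5':'{', 'BU':']',
--     'JU':'}', 'Uh':'|', 'ZU':';', 'Ux':':', '5U':'"', 'Bk':',',
--     'Jk':'<', 'Rk':'.', 'I':'>', 'Zk':'/', 'xk':'?', 'pk':'`',
--     '5k':'~'
-- }
--
-- def split_fragments(code):
--     code = code[1:]
--     frags = []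
--     for i in range(0, len(code), 3):
--         if i+3 <= len(code):
--             frags.append(code[i:i+3])
--     return frags
--
-- def merge_fragments(frags):
--     merged = []
--     i = 0
--     while i < len(frags):
--         cur = frags[i]
--         if i+1 < len(frags):
--             nxt = frags[i+1]
--             if cur[1:] == nxt[1:]:
--                 merged.append(cur[0] + nxt[0])
--                 i += 2
--                 continue
--         merged.append(cur[0])
--         i += 1
--     return merged
--
-- def unmask(code):
--     frags = split_fragments(code)
--     mains = merge_fragments(frags)
--     result = ""
--     for m in mains:
--         if m in Key:
--             result += Key[m]
--         else:
--             for ch in m: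
--                 if ch in Key:
--                     result += Key[ch]
--     return result
-- ===== SOURCE B (Python) =====
-- Key = {
--     'B':'A', 'J':'B', 'R':'C', 'h':'D', 'Z':'E', 'x':'F', 'p':'G',
--     '5':'H', 'C':'I', 'K':'J', 'S':'K', 'i':'L', 'a':'M', 'y':'N',
--     'q':'O', '6':'P', 'E':'Q', 'M':'R', 'U':'S', 'k':'T', 'c':'U',
--     '0':'V', 's':'W', '8':'XYZ', 'GJ':'1', 'GZ':'2', 'G5':'3',
--     'EK5':'4', 'Ea5':'5', 'E7':'6', 'M7':'7', 'c7':'8', '/':'9',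
--     'H':'0', 'F':'!', 'EJ':'@', 'ER':'#', 'Eh':'$', 'EZ':'%',
--     'Ex':'^', 'Ep':'&', 'E5':'*', 'BM':'(', 'N':')', 'MR':'-',
--     'Mh':'_', 'MZ':'=', 'Mx':'+', 'Mp':'[', 'M5':'{', 'BU':']',
--     'JU':'}', 'Uh':'|', 'ZU':';', 'Ux':':', '5U':'"', 'Bk':',',
--     'Jk':'<', 'Rk':'.', 'I':'>', 'Zk':'/', 'xk':'?', 'pk':'`',
--     '5k':'~'
-- }
--
-- def unmask(code):
--     # single pass over code[1:] with an explicit index: form each token in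
--     # place (advance 6 on a merge of two triples with equal tails, else 3)
--     # and resolve it immediately; no fragment/token lists are built.
--     out = []
--     i = 1
--     n = len(code)
--     while i + 3 <= n:
--         token = code[i]
--         if i + 6 <= n and code[i+1:i+3] == code[i+4:i+6]:
--             token += code[i+3]
--             i += 6
--         else:
--             i += 3
--         if token in Key:
--             out.append(Key[token])
--         else:
--             out.extend(Key[ch] for ch in token if ch in Key)
--     return "".join(out)
-- ===== Notes on version B (the rewrite author's own statement) =====
-- stated objective: simpler
-- what changed: Replaced A's three staged passes (build a fragment list, merge it into a token list, then a lookup loop) with one index-advancing loop over the string that forms each token in place (advance 3 or 6) and resolves it immediately, building no intermediate fragment/token lists.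
import Mathlib
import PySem

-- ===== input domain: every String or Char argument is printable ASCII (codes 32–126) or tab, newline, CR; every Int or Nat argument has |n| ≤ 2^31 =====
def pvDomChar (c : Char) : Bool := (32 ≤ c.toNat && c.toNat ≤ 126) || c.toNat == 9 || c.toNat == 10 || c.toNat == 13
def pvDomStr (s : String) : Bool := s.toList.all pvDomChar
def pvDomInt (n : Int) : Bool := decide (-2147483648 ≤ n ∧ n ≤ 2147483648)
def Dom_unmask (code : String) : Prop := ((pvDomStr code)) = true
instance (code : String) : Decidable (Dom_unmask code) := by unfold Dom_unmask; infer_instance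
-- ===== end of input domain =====

-- B replaces A's three staged passes (fragment list, merged token list, lookup loop) with one
-- index-advancing loop that forms and resolves each token in place; objective: simpler, same O(n) cost.

-- ===== PORT A =====
-- The module-level Key dict as A's port uses it: an association list over the strings' character
-- lists (lookup = first match).
def keyPairs : List (List Char × List Char) :=
  [(['B'], ['A']), (['J'], ['B']), (['R'], ['C']), (['h'], ['D']), (['Z'], ['E']),
   (['x'], ['F']), (['p'], ['G']), (['5'], ['H']), (['C'], ['I']), (['K'], ['J']),
   (['S'], ['K']), (['i'], ['L']), (['a'], ['M']), (['y'], ['N']), (['q'], ['O']),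
   (['6'], ['P']), (['E'], ['Q']), (['M'], ['R']), (['U'], ['S']), (['k'], ['T']),
   (['c'], ['U']), (['0'], ['V']), (['s'], ['W']), (['8'], ['X', 'Y', 'Z']),
   (['G', 'J'], ['1']), (['G', 'Z'], ['2']), (['G', '5'], ['3']),
   (['E', 'K', '5'], ['4']), (['E', 'a', '5'], ['5']), (['E', '7'], ['6']),
   (['M', '7'], ['7']), (['c', '7'], ['8']), (['/'], ['9']), (['H'], ['0']),
   (['F'], ['!']), (['E', 'J'], ['@']), (['E', 'R'], ['#']), (['E', 'h'], ['$']),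
   (['E', 'Z'], ['%']), (['E', 'x'], ['^']), (['E', 'p'], ['&']), (['E', '5'], ['*']),
   (['B', 'M'], ['(']), (['N'], [')']), (['M', 'R'], ['-']), (['M', 'h'], ['_']),
   (['M', 'Z'], ['=']), (['M', 'x'], ['+']), (['M', 'p'], ['[']), (['M', '5'], ['{']),
   (['B', 'U'], [']']), (['J', 'U'], ['}']), (['U', 'h'], ['|']), (['Z', 'U'], [';']),
   (['U', 'x'], [':']), (['5', 'U'], ['"']), (['B', 'k'], [',']), (['J', 'k'], ['<']),
   (['R', 'k'], ['.']), (['I'], ['>']), (['Z', 'k'], ['/']), (['x', 'k'], ['?']),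
   (['p', 'k'], ['`']), (['5', 'k'], ['~'])]

-- split_fragments: code[1:] chopped into the successive full 3-char chunks.
def splitFrags : List Char → List (List Char)
  | a :: b :: c :: rest => [a, b, c] :: splitFrags rest
  | _ => []

-- merge_fragments: merge cur/nxt into cur[0]+nxt[0] when cur[1:] == nxt[1:], else keep cur[0].
def mergeFrags : List (List Char) → List (List Char)
  | cur :: nxt :: rest =>
      if cur.drop 1 = nxt.drop 1 then (cur.take 1 ++ nxt.take 1) :: mergeFrags rest
      else cur.take 1 :: mergeFrags (nxt :: rest)
  | [cur] => [cur.take 1]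
  | [] => []

def unmask (code : String) : String :=
  String.ofList ((mergeFrags (splitFrags (code.toList.drop 1))).foldl
    (fun res m =>
      if (keyPairs.lookup m).isSome then res ++ (keyPairs.lookup m).getD []
      else m.foldl
        (fun r ch =>
          if (keyPairs.lookup [ch]).isSome then r ++ (keyPairs.lookup [ch]).getD [] else r)
        res)
    [])

-- ===== PORT B =====
-- The same module-level Key dict as Source B reads it: string keys to string values.
def keyTable : List (String × String) :=
  [("B", "A"), ("J", "B"), ("R", "C"), ("h", "D"), ("Z", "E"),
   ("x", "F"), ("p", "G"), ("5", "H"), ("C", "I"), ("K", "J"),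
   ("S", "K"), ("i", "L"), ("a", "M"), ("y", "N"), ("q", "O"),
   ("6", "P"), ("E", "Q"), ("M", "R"), ("U", "S"), ("k", "T"),
   ("c", "U"), ("0", "V"), ("s", "W"), ("8", "XYZ"),
   ("GJ", "1"), ("GZ", "2"), ("G5", "3"),
   ("EK5", "4"), ("Ea5", "5"), ("E7", "6"),
   ("M7", "7"), ("c7", "8"), ("/", "9"), ("H", "0"),
   ("F", "!"), ("EJ", "@"), ("ER", "#"), ("Eh", "$"),
   ("EZ", "%"), ("Ex", "^"), ("Ep", "&"), ("E5", "*"),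
   ("BM", "("), ("N", ")"), ("MR", "-"), ("Mh", "_"),
   ("MZ", "="), ("Mx", "+"), ("Mp", "["), ("M5", "{"),
   ("BU", "]"), ("JU", "}"), ("Uh", "|"), ("ZU", ";"),
   ("Ux", ":"), ("5U", "\""), ("Bk", ","), ("Jk", "<"),
   ("Rk", "."), ("I", ">"), ("Zk", "/"), ("xk", "?"),
   ("pk", "`"), ("5k", "~")]

-- token resolution: full-token lookup ('token in Key') gives one piece, else one piece per
-- character of the token that is a key (absent characters skipped) — Source B's append/extend.
def resolveTokB (tok : String) : List String :=
  match keyTable.lookup tok with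
  | some v => [v]
  | none => tok.toList.filterMap fun ch => keyTable.lookup (String.ofList [ch])

-- Source B's single while-loop over code[1:]: advance 6 on a merge of two triples with equal
-- tails, else 3; pieces are collected and joined at the end ("".join(out)).
def unmaskLoopB : List Char → List String
  | a :: b :: c :: d :: e :: f :: rest =>
      if b = e ∧ c = f then resolveTokB (String.ofList [a, d]) ++ unmaskLoopB rest
      else resolveTokB (String.ofList [a]) ++ unmaskLoopB (d :: e :: f :: rest)
  | a :: _ :: _ :: rest => resolveTokB (String.ofList [a]) ++ unmaskLoopB rest
  | _ => []
termination_by cs => cs.length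
decreasing_by all_goals simp <;> omega

def unmask_alt (code : String) : String :=
  PySem.Str.join "" (unmaskLoopB (code.toList.drop 1))

-- ===== PRECONDITION & SPEC =====
def Spec_unmask (code : String) (out : String) : Prop := out = unmask_alt code
instance (code : String) (out : String) : Decidable (Spec_unmask code out) := by unfold Spec_unmask; infer_instance

-- ===== CLAIM (what is proved, stated in full; the proofs are below) =====
def Claim_equal_unmask : Prop := ∀ (code : String), Dom_unmask code → Spec_unmask code (unmask code)

-- ===== LEMMAS AND PROOFS =====

-- Proof-side abstraction of a token's resolution as a list of characters.
def resolveTok (tok : List Char) : List Char :=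
  match keyPairs.lookup tok with
  | some v => v
  | none => tok.flatMap fun ch => (keyPairs.lookup [ch]).getD []

-- A's inner per-character loop is an append of the per-character resolutions.
lemma inner_fold (m r : List Char) :
    m.foldl
      (fun r ch =>
        if (keyPairs.lookup [ch]).isSome then r ++ (keyPairs.lookup [ch]).getD [] else r)
      r
    = r ++ m.flatMap (fun ch => (keyPairs.lookup [ch]).getD []) := by
  induction m generalizing r with
  | nil => simp
  | cons a t ih =>
      simp only [List.foldl_cons, List.flatMap_cons, ih]
      cases keyPairs.lookup [a] <;> simp

-- A's outer loop body equals resolveTok.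
lemma step_eq (res m : List Char) :
    (if (keyPairs.lookup m).isSome then res ++ (keyPairs.lookup m).getD []
     else m.foldl
        (fun r ch =>
          if (keyPairs.lookup [ch]).isSome then r ++ (keyPairs.lookup [ch]).getD [] else r)
        res)
    = res ++ resolveTok m := by
  unfold resolveTok
  cases keyPairs.lookup m <;> simp [inner_fold]

-- A's outer loop is an append of the token resolutions.
lemma outer_fold (ms : List (List Char)) (acc : List Char) :
    ms.foldl
      (fun res m =>
        if (keyPairs.lookup m).isSome then res ++ (keyPairs.lookup m).getD []
        else m.foldl
          (fun r ch =>
            if (keyPairs.lookup [ch]).isSome then r ++ (keyPairs.lookup [ch]).getD [] else r)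
          res)
      acc
    = acc ++ ms.flatMap resolveTok := by
  induction ms generalizing acc with
  | nil => simp
  | cons m t ih =>
      rw [List.foldl_cons, step_eq, ih, List.flatMap_cons, List.append_assoc]

-- B's string-keyed table is the image of A's char-list table under String.ofList.
lemma table_eq : keyTable = keyPairs.map (fun p => (String.ofList p.1, String.ofList p.2)) := by
  decide

lemma ofList_beq (k t : List Char) : (String.ofList k == String.ofList t) = (k == t) := by
  cases h : k == t
  · have hne : k ≠ t := by simpa using h
    have hs : String.ofList k ≠ String.ofList t :=
      fun he => hne (by simpa using congrArg String.toList he)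
    simpa [beq_eq_false_iff_ne] using hs
  · have : k = t := by simpa using h
    subst this; simp

-- Lookup in the string table mirrors lookup in the char-list table.
lemma lookup_bridge (l : List (List Char × List Char)) (tok : List Char) :
    (l.map (fun p => (String.ofList p.1, String.ofList p.2))).lookup (String.ofList tok)
    = (l.lookup tok).map String.ofList := by
  induction l with
  | nil => rfl
  | cons p t ih =>
      simp only [List.map_cons, List.lookup, ofList_beq]
      cases h : tok == p.1 <;> simp [ih]

-- The per-character fallback, flattened back to characters.
lemma fallback_eq (t : List Char) :
    ((t.filterMap (fun ch => (keyPairs.lookup [ch]).map String.ofList)).map String.toList).flatten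
    = t.flatMap (fun ch => (keyPairs.lookup [ch]).getD []) := by
  induction t with
  | nil => rfl
  | cons a t ih =>
      simp only [List.filterMap_cons, List.flatMap_cons]
      cases keyPairs.lookup [a] <;> simp_all

-- B's token resolution, flattened back to characters, is resolveTok.
lemma resolveB_eq (tok : List Char) :
    ((resolveTokB (String.ofList tok)).map String.toList).flatten = resolveTok tok := by
  unfold resolveTokB resolveTok
  rw [table_eq]
  simp only [lookup_bridge, String.toList_ofList]
  cases keyPairs.lookup tok with
  | some v => simp
  | none => simpa using fallback_eq tok

lemma unmaskLoopB_short (cs : List Char) (h : cs.length < 3) : unmaskLoopB cs = [] := by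
  match cs with
  | [] => simp [unmaskLoopB]
  | [_] => simp [unmaskLoopB]
  | [_, _] => simp [unmaskLoopB]
  | _ :: _ :: _ :: _ => simp at h; omega

lemma splitFrags_short (cs : List Char) (h : cs.length < 3) : splitFrags cs = [] := by
  match cs with
  | [] => rfl
  | [_] => rfl
  | [_, _] => rfl
  | _ :: _ :: _ :: _ => simp at h; omega

-- The heart: A's three-pass pipeline equals B's single loop (read as characters).
lemma pipeline_eq (cs : List Char) :
    ((unmaskLoopB cs).map String.toList).flatten
    = (mergeFrags (splitFrags cs)).flatMap resolveTok := by
  induction cs using unmaskLoopB.induct with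
  | case1 a b c d e f rest hcond ih =>
      obtain ⟨hb, hc⟩ := hcond
      subst hb; subst hc
      simp [splitFrags, mergeFrags, unmaskLoopB, ih, resolveB_eq]
  | case2 a b c d e f rest hcond ih =>
      have hne : ¬ ([b, c] = [e, f]) := by simpa using hcond
      simp only [splitFrags] at ih ⊢
      simp [mergeFrags, unmaskLoopB, hne, hcond, ih, resolveB_eq]
  | case3 a b c rest hshape ih =>
      have hlen : rest.length < 3 := by
        match rest with
        | [] => simp
        | [_] => simp
        | [_, _] => simp
        | x :: y :: z :: t => exact absurd rfl (fun h => (hshape x y z t h).elim)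
      simp [splitFrags, mergeFrags, splitFrags_short rest hlen, unmaskLoopB,
            unmaskLoopB_short rest hlen, resolveB_eq]
  | case4 cs _ hshape =>
      have hlen : cs.length < 3 := by
        match cs with
        | [] => simp
        | [_] => simp
        | [_, _] => simp
        | x :: y :: z :: t => exact absurd rfl (fun h => (hshape x y z t h).elim)
      simp [splitFrags_short cs hlen, unmaskLoopB_short cs hlen, mergeFrags]

-- "".join(pieces) is the concatenation of the pieces' character lists.
lemma join_flatten (parts : List String) :
    PySem.Str.join "" parts = String.ofList ((parts.map String.toList).flatten) := by
  simp only [PySem.Str.join, PySem.Chars.join]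
  congr 1
  induction (parts.map String.toList) with
  | nil => rfl
  | cons h t ih => cases t <;> simp_all [List.intercalate]

-- ===== VERDICT (by name: the statement is the Claim_ definition above) =====
theorem unmask_spec : Claim_equal_unmask := by
  intro code _
  unfold Spec_unmask unmask unmask_alt
  rw [outer_fold, List.nil_append, join_flatten, pipeline_eq]
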